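-- pv_equiv track=rewrite | github.com/mario3219/intro-projects | lab06/words.py | count_all_except
-- ===== SOURCE A (Python) =====
-- def count_all_except(words, stopwords):
--     counts = [0]*len(words)
--     my_zip = zip(words, counts)
--     counts = dict(my_zip)
--
--     for word in words:
--         if word not in stopwords:
--             counts[word] = counts[word] + 1
--     return counts
-- ===== SOURCE B (Python) =====
-- def count_all_except(words, stopwords):
--     # Distinct words in first-appearance order, then one closed-form count per key:
--     # no incremental counting loop, no mutation of a running dict.
--     return {w: (0 if w in stopwords else words.count(w))
--             for w in dict.fromkeys(words)}
-- ===== Notes on version B (the rewrite author's own statement) =====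
-- stated objective: alternative
-- what changed: B builds no running dict at all: it takes the distinct words in first-appearance order (dict.fromkeys) and maps each to a closed-form value, 0 for stopwords else words.count(w), instead of A's zero-initialised dict mutated by a per-token increment loop.
import Mathlib
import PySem

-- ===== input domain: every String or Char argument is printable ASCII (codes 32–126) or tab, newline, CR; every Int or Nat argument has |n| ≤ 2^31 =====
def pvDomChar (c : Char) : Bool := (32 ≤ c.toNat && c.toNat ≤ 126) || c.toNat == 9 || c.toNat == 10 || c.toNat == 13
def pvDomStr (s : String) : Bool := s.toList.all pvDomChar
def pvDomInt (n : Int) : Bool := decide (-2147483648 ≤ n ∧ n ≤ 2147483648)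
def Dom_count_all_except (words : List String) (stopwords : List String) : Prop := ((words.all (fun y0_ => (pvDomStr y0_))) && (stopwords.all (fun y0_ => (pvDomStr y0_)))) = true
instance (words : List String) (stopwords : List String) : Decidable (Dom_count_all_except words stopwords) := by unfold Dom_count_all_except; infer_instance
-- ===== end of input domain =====

-- B replaces A's incremental dict-mutation loop by a direct comprehension: dedupe the
-- words (first-appearance order) and compute each count in closed form (alternative decomposition).

-- ===== PORT A =====
def count_all_except (words : List String) (stopwords : List String) : List (String × Int) :=
  -- counts = [0]*len(words); counts = dict(zip(words, counts))
  let counts := PySem.Dict.ofList (words.zip (List.replicate words.length (0 : Int)))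
  -- for word in words: if word not in stopwords: counts[word] = counts[word] + 1
  -- (counts[word] is always present here, so getD _ 0 is exact)
  let counts := words.foldl
    (fun d word => if ¬ (word ∈ stopwords) then d.insert word (d.getD word 0 + 1) else d) counts
  counts.items

-- ===== PORT B =====
def count_all_except_alt (words : List String) (stopwords : List String) : List (String × Int) :=
  -- {w: (0 if w in stopwords else words.count(w)) for w in dict.fromkeys(words)}
  (PySem.List.dedup words).map
    (fun w => (w, if w ∈ stopwords then (0 : Int) else (PySem.List.count words w : Int)))

-- ===== PRECONDITION & SPEC =====
def Spec_count_all_except (words : List String) (stopwords : List String) (out : List (String × Int)) : Prop := out = count_all_except_alt words stopwords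
instance (words : List String) (stopwords : List String) (out : List (String × Int)) : Decidable (Spec_count_all_except words stopwords out) := by unfold Spec_count_all_except; infer_instance

-- ===== CLAIM (what is proved, stated in full; the proofs are below) =====
def Claim_equal_count_all_except : Prop := ∀ (words : List String) (stopwords : List String), Dom_count_all_except words stopwords → Spec_count_all_except words stopwords (count_all_except words stopwords)

-- ===== LEMMAS AND PROOFS =====

-- a fold of inserts whose values are all 0 leaves every getD _ 0 at 0
theorem pv_getD_zeros (k : String) :
    ∀ (ps : List (String × Int)) (d : PySem.Dict String Int),
      (∀ p ∈ ps, p.2 = (0 : Int)) → d.getD k 0 = 0 →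
      (ps.foldl (fun d p => d.insert p.1 p.2) d).getD k 0 = 0 := by
  intro ps
  induction ps with
  | nil => intro d _ hd; simpa using hd
  | cons p ps ih =>
    intro d hps hd
    simp only [List.foldl_cons]
    refine ih _ (fun q hq => hps q (by simp [hq])) ?_
    rw [PySem.Dict.getD_insert]
    split
    · exact hps p (by simp)
    · exact hd

-- a fold whose step preserves keys on already-present keys preserves the key list
theorem pv_keys_pres (g : PySem.Dict String Int → String → PySem.Dict String Int)
    (hg : ∀ d w, w ∈ PySem.Dict.keys d → PySem.Dict.keys (g d w) = PySem.Dict.keys d) :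
    ∀ (l : List String) (d : PySem.Dict String Int),
      (∀ w ∈ l, w ∈ PySem.Dict.keys d) → PySem.Dict.keys (l.foldl g d) = PySem.Dict.keys d := by
  intro l
  induction l with
  | nil => intro d _; rfl
  | cons w l ih =>
    intro d h
    simp only [List.foldl_cons]
    rw [ih _ (fun x hx => by rw [hg d w (h w (by simp))]; exact h x (by simp [hx])),
        hg d w (h w (by simp))]

-- A's counting loop: getD after the loop
theorem pv_loopA_getD (sw : List String) (k : String) :
    ∀ (l : List String) (d : PySem.Dict String Int),
      (l.foldl (fun d word => if ¬ (word ∈ sw) then d.insert word (d.getD word 0 + 1) else d) d).getD k 0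
      = d.getD k 0 + (if k ∈ sw then 0 else (l.count k : Int)) := by
  intro l
  induction l with
  | nil => intro d; simp
  | cons w l ih =>
    intro d
    simp only [List.foldl_cons]
    by_cases hw : w ∈ sw
    · rw [if_neg (by simp [hw]), ih]
      by_cases hk : k ∈ sw
      · simp [hk]
      · have hkw : ¬ k = w := fun h => hk (h ▸ hw)
        have hwk : ¬ w = k := fun h => hkw h.symm
        simp [hk, hwk]
    · rw [if_pos (by simp [hw]), ih, PySem.Dict.getD_insert]
      by_cases hkw : k = w
      · subst hkw
        have hk : ¬ k ∈ sw := hw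
        simp [hk]
        ring
      · have hwk : ¬ w = k := fun h => hkw h.symm
        by_cases hk : k ∈ sw
        · simp [hk, hkw]
        · simp [hk, hkw, hwk]

-- keys of A's initial dict are the distinct words in first-appearance order
theorem pv_keysA0 (words : List String) :
    PySem.Dict.keys (PySem.Dict.ofList (words.zip (List.replicate words.length (0 : Int))))
      = PySem.Set.ofList words := by
  have h : PySem.Dict.ofList (words.zip (List.replicate words.length (0 : Int)))
      = (words.zip (List.replicate words.length (0 : Int))).foldl
          (fun d p => d.insert p.1 p.2) PySem.Dict.empty := rfl
  rw [h, PySem.Dict.keys_foldl_insert_key _ (fun p : String × Int => p.1) (fun d p => p.2)]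
  rw [PySem.Dict.keys_empty, PySem.Set.update_nil_left]
  congr 1
  exact List.map_fst_zip (by simp)

theorem count_all_except_eq (words stopwords : List String) :
    count_all_except words stopwords = count_all_except_alt words stopwords := by
  unfold count_all_except count_all_except_alt
  have hkA0 := pv_keysA0 words
  have hkA : PySem.Dict.keys
      (words.foldl (fun d word => if ¬ (word ∈ stopwords) then d.insert word (d.getD word 0 + 1) else d)
        (PySem.Dict.ofList (words.zip (List.replicate words.length (0 : Int)))))
      = PySem.Set.ofList words := by
    rw [pv_keys_pres _ ?hg words _ ?hmem, hkA0]
    case hg =>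
      intro d w hw
      split
      · exact PySem.Dict.keys_insert_of_contains _ _ ((PySem.Dict.contains_iff_mem_keys _ _).2 hw)
      · rfl
    case hmem =>
      intro w hw; rw [hkA0]; exact (PySem.Set.mem_ofList _ _).2 hw
  have hndA : (PySem.Dict.keys
      (words.foldl (fun d word => if ¬ (word ∈ stopwords) then d.insert word (d.getD word 0 + 1) else d)
        (PySem.Dict.ofList (words.zip (List.replicate words.length (0 : Int)))))).Nodup := by
    rw [hkA]; exact PySem.Set.nodup_ofList words
  rw [PySem.Dict.items_eq_map_keys _ hndA 0, hkA, PySem.List.dedup_eq_ofList]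
  apply List.map_congr_left
  intro k hk
  rw [pv_loopA_getD]
  have h0 : (PySem.Dict.ofList (words.zip (List.replicate words.length (0 : Int)))).getD k 0 = 0 := by
    refine pv_getD_zeros k _ _ (fun p hp => ?_) (by simp [PySem.Dict.getD_empty])
    exact List.eq_of_mem_replicate (List.of_mem_zip hp).2
  rw [h0, PySem.List.count_eq]
  by_cases hs : k ∈ stopwords
  · simp [hs]
  · simp [hs]

-- ===== VERDICT (by name: the statement is the Claim_ definition above) =====
theorem count_all_except_spec : Claim_equal_count_all_except := by
  intro words stopwords _
  unfold Spec_count_all_except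
  exact count_all_except_eq words stopwords
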